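-- pv_equiv track=rewrite | github.com/yanboANU/HaploDivide | HaploCheck/tools.py | is_Bool_Reverse
-- ===== SOURCE A (Python) =====
-- def is_Bool_Reverse(s1, s2):
--     assert len(s1) == len(s2)
--     if s1.find('2') != -1 or s2.find('2') != -1:
--         return False
--     for i in range(len(s1)):
--         if s1[i] == s2[i]:
--             return False
--     return True
-- ===== SOURCE B (Python) =====
-- def is_Bool_Reverse(s1, s2):
--     assert len(s1) == len(s2)
--     n = len(s1)
--     if n == 0:
--         return True
--     if n == 1:
--         return s1 != s2 and s1 != '2' and s2 != '2'
--     m = n // 2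
--     return is_Bool_Reverse(s1[:m], s2[:m]) and is_Bool_Reverse(s1[m:], s2[m:])
-- ===== Notes on version B (the rewrite author's own statement) =====
-- stated objective: alternative
-- what changed: Replaces A's staged linear scans (two find('2') passes then an index loop) by divide and conquer: split both strings at the midpoint, recurse on the halves, single-character base case doing the fused test; no separate '2' scan and no index loop.
import Mathlib
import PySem

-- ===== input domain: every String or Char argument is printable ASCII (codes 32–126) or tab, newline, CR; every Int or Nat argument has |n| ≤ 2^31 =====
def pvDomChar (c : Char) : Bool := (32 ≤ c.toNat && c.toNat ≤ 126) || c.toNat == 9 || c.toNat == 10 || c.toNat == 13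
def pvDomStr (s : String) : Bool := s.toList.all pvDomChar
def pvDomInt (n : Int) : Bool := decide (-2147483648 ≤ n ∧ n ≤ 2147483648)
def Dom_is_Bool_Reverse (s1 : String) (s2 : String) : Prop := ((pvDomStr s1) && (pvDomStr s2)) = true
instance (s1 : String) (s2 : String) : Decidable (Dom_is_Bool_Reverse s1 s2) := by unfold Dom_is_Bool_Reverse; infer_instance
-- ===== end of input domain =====

-- B replaces A's staged linear scans (two find('2') passes + an index loop) by divide
-- and conquer on the midpoint split; objective: alternative algorithm.

-- ===== PORT A =====
-- the 'for i in range(len(s1))' loop with its early 'return False'; s1[i]/s2[i] are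
-- in range under Pre_ (equal lengths), so pyGetD is exact here
def pvALoop (l1 l2 : List Char) : List Int → Bool
  | [] => true
  | i :: rest =>
    if PySem.List.pyGetD l1 i ' ' == PySem.List.pyGetD l2 i ' ' then false
    else pvALoop l1 l2 rest

def is_Bool_Reverse (s1 : String) (s2 : String) : Bool :=
  if PySem.Str.find s1 "2" ≠ -1 ∨ PySem.Str.find s2 "2" ≠ -1 then false
  else pvALoop s1.toList s2.toList (PySem.List.pyRange 0 (PySem.Str.len s1) 1)

-- ===== PORT B =====
-- B's divide and conquer: n == 0 → True; n == 1 → fused test on the single characters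
-- (Python's s1 != s2 / s1 != '2' on length-1 strings is the head-character test);
-- else split at m = n // 2 and recurse on both halves. s[:m] / s[m:] with 0 ≤ m ≤ n
-- are exactly List.take / List.drop. The catch-all in the n == 1 case is unreachable
-- under Pre_ (equal lengths; unequal lengths raise B's assert, like A's).
def pvBRec (l1 l2 : List Char) : Bool :=
  if l1.length = 0 then true
  else if l1.length = 1 then
    match l1, l2 with
    | [a], [b] => a != b && a != '2' && b != '2'
    | _, _ => false
  else
    pvBRec (l1.take (l1.length / 2)) (l2.take (l1.length / 2)) &&
    pvBRec (l1.drop (l1.length / 2)) (l2.drop (l1.length / 2))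
termination_by l1.length
decreasing_by
  · simp only [List.length_take]; omega
  · simp only [List.length_drop]; omega

def is_Bool_Reverse_alt (s1 : String) (s2 : String) : Bool :=
  pvBRec s1.toList s2.toList

-- ===== PRECONDITION & SPEC =====
-- A asserts len(s1) == len(s2); on unequal lengths it raises AssertionError, excluded here.
def Pre_is_Bool_Reverse (s1 : String) (s2 : String) : Prop := s1.toList.length = s2.toList.length
instance (s1 : String) (s2 : String) : Decidable (Pre_is_Bool_Reverse s1 s2) := by unfold Pre_is_Bool_Reverse; infer_instance
def pvWitness_is_Bool_Reverse : String × String := ("abc", "bcd")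

def Spec_is_Bool_Reverse (s1 : String) (s2 : String) (out : Bool) : Prop := out = is_Bool_Reverse_alt s1 s2
instance (s1 : String) (s2 : String) (out : Bool) : Decidable (Spec_is_Bool_Reverse s1 s2 out) := by unfold Spec_is_Bool_Reverse; infer_instance

-- ===== CLAIM (what is proved, stated in full; the proofs are below) =====
def Claim_equal_is_Bool_Reverse : Prop := ∀ (s1 : String) (s2 : String), Dom_is_Bool_Reverse s1 s2 → Pre_is_Bool_Reverse s1 s2 → Spec_is_Bool_Reverse s1 s2 (is_Bool_Reverse s1 s2)

-- ===== LEMMAS AND PROOFS =====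

-- B's divide and conquer computes the fused per-position test over the zipped strings
theorem pvBRec_eq (l1 l2 : List Char) (h : l1.length = l2.length) :
    pvBRec l1 l2 = (l1.zip l2).all (fun p => p.1 != p.2 && p.1 != '2' && p.2 != '2') := by
  by_cases h0 : l1.length = 0
  · rw [pvBRec, if_pos h0]
    · rw [List.length_eq_zero_iff.mp h0]; rfl
    · intro a b ha _; rw [ha] at h0; simp at h0
  · by_cases h1 : l1.length = 1
    · obtain ⟨a, ha⟩ := List.length_eq_one_iff.mp h1
      obtain ⟨b, hb⟩ := List.length_eq_one_iff.mp (h ▸ h1)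
      subst ha hb
      rw [pvBRec]
      simp
    · set m := l1.length / 2 with hm
      have htk1 : (l1.take m).length = m := by simp [hm]; omega
      have htk2 : (l2.take m).length = m := by simp [hm, ← h]; omega
      have ih1 : pvBRec (l1.take m) (l2.take m)
          = ((l1.take m).zip (l2.take m)).all
              (fun p => p.1 != p.2 && p.1 != '2' && p.2 != '2') :=
        pvBRec_eq (l1.take m) (l2.take m) (htk1.trans htk2.symm)
      have ih2 : pvBRec (l1.drop m) (l2.drop m)
          = ((l1.drop m).zip (l2.drop m)).all
              (fun p => p.1 != p.2 && p.1 != '2' && p.2 != '2') :=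
        pvBRec_eq (l1.drop m) (l2.drop m) (by simp [← h])
      rw [pvBRec, if_neg h0, if_neg h1, ← hm, ih1, ih2]
      · have hz : l1.zip l2 = (l1.take m).zip (l2.take m) ++ (l1.drop m).zip (l2.drop m) := by
          conv_lhs => rw [← List.take_append_drop m l1, ← List.take_append_drop m l2]
          exact List.zip_append (htk1.trans htk2.symm)
        rw [hz, List.all_append]
      · intro a b ha _; rw [ha] at h1; simp at h1
termination_by l1.length
decreasing_by
  · simp only [List.length_take]; omega
  · simp only [List.length_drop]; omega

theorem pv_all_and (l : List (Char × Char)) (p q : Char × Char → Bool) :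
    l.all (fun x => p x && q x) = (l.all p && l.all q) := by
  induction l with
  | nil => rfl
  | cons a t ih =>
    simp only [List.all_cons, ih]
    cases p a <;> cases q a <;> simp

-- the index loop, started at k, is the 'no equal pair' test on the dropped suffixes
theorem pvALoop_eq (l1 l2 : List Char) (h : l1.length = l2.length) (k : Nat) :
    pvALoop l1 l2 (PySem.List.pyRange (k : Int) (l1.length : Int) 1)
      = ((l1.drop k).zip (l2.drop k)).all (fun p => p.1 != p.2) := by
  by_cases hk : k < l1.length
  · rw [PySem.List.pyRange_one_cons (by exact_mod_cast hk)]
    have h2 : k < l2.length := h ▸ hk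
    have e1 : PySem.List.pyGetD l1 (k : Int) ' ' = l1[k] := by
      rw [PySem.List.pyGetD_natCast]; exact List.getD_eq_getElem l1 ' ' hk
    have e2 : PySem.List.pyGetD l2 (k : Int) ' ' = l2[k] := by
      rw [PySem.List.pyGetD_natCast]; exact List.getD_eq_getElem l2 ' ' h2
    have d1 : l1.drop k = l1[k] :: l1.drop (k + 1) := List.drop_eq_getElem_cons hk
    have d2 : l2.drop k = l2[k] :: l2.drop (k + 1) := List.drop_eq_getElem_cons h2
    have hrec := pvALoop_eq l1 l2 h (k + 1)
    simp only [pvALoop, e1, e2, d1, d2, List.zip_cons_cons, List.all_cons]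
    by_cases he : l1[k] = l2[k]
    · simp [he]
    · have hcast : ((k : Int) + 1) = ((k + 1 : Nat) : Int) := by push_cast; ring
      have hb : (l1[k] == l2[k]) = false := beq_eq_false_iff_ne.mpr he
      rw [hcast, hrec, hb]
      simp [bne, hb]
  · have h1 : l1.drop k = [] := List.drop_eq_nil_of_le (by omega)
    have hle : (l1.length : Int) ≤ (k : Int) := by exact_mod_cast Nat.le_of_not_lt hk
    rw [PySem.List.pyRange_one_eq_nil hle]
    simp [pvALoop, h1]
termination_by l1.length - k

theorem pv_singleton_infix (c : Char) (l : List Char) : ([c] <:+: l) ↔ c ∈ l := by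
  constructor
  · intro h; exact List.singleton_sublist.mp h.sublist
  · intro h
    obtain ⟨a, b, hab⟩ := List.append_of_mem h
    exact ⟨a, b, by simp [hab]⟩

theorem pv_mem_iff_find (s : String) :
    (PySem.Str.find s "2" ≠ -1) ↔ '2' ∈ s.toList := by
  have hsub : ("2".toList : List Char) = ['2'] := by decide
  simp only [PySem.Str.find_eq]
  rw [ne_eq, PySem.Chars.find_eq_neg_one_iff, hsub, not_not, pv_singleton_infix]

theorem pv_zip_all_ne2_left : ∀ (l1 l2 : List Char), l1.length = l2.length →
    (l1.zip l2).all (fun p => p.1 != '2') = l1.all (fun c => c != '2')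
  | [], [], _ => rfl
  | a :: t1, b :: t2, h => by
    simp only [List.zip_cons_cons, List.all_cons]
    rw [pv_zip_all_ne2_left t1 t2 (by simpa using h)]

theorem pv_zip_all_ne2_right : ∀ (l1 l2 : List Char), l1.length = l2.length →
    (l1.zip l2).all (fun p => p.2 != '2') = l2.all (fun c => c != '2')
  | [], [], _ => rfl
  | a :: t1, b :: t2, h => by
    simp only [List.zip_cons_cons, List.all_cons]
    rw [pv_zip_all_ne2_right t1 t2 (by simpa using h)]

-- ===== VERDICT (by name: the statement is the Claim_ definition above) =====
theorem is_Bool_Reverse_spec : Claim_equal_is_Bool_Reverse := by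
  unfold Claim_equal_is_Bool_Reverse
  intro s1 s2 _ hpre
  unfold Spec_is_Bool_Reverse is_Bool_Reverse is_Bool_Reverse_alt
  have hlen : s1.toList.length = s2.toList.length := hpre
  rw [pvBRec_eq _ _ hlen,
      show (fun p : Char × Char => p.1 != p.2 && p.1 != '2' && p.2 != '2')
        = (fun p : Char × Char => ((fun q : Char × Char => q.1 != q.2 && q.1 != '2') p
            && (fun q : Char × Char => q.2 != '2') p)) from rfl,
      pv_all_and, pv_all_and, pv_zip_all_ne2_left _ _ hlen, pv_zip_all_ne2_right _ _ hlen]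
  by_cases hf : PySem.Str.find s1 "2" ≠ -1 ∨ PySem.Str.find s2 "2" ≠ -1
  · rw [if_pos hf]
    rcases hf with hf | hf
    · have hm := (pv_mem_iff_find s1).mp hf
      have ha : s1.toList.all (fun c => c != '2') = false := by
        simp only [List.all_eq_false]
        exact ⟨'2', hm, by simp⟩
      simp [ha]
    · have hm := (pv_mem_iff_find s2).mp hf
      have ha : s2.toList.all (fun c => c != '2') = false := by
        simp only [List.all_eq_false]
        exact ⟨'2', hm, by simp⟩
      simp [ha]
  · rw [if_neg hf]
    push Not at hf
    have m1 : '2' ∉ s1.toList := fun hm => (not_not.mpr hf.1) ((pv_mem_iff_find s1).mpr hm)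
    have m2 : '2' ∉ s2.toList := fun hm => (not_not.mpr hf.2) ((pv_mem_iff_find s2).mpr hm)
    have a1 : s1.toList.all (fun c => c != '2') = true := by
      rw [List.all_eq_true]; intro c hc
      exact bne_iff_ne.mpr (fun hce => m1 (hce ▸ hc))
    have a2 : s2.toList.all (fun c => c != '2') = true := by
      rw [List.all_eq_true]; intro c hc
      exact bne_iff_ne.mpr (fun hce => m2 (hce ▸ hc))
    have hloop := pvALoop_eq s1.toList s2.toList hlen 0
    simp only [Nat.cast_zero, List.drop_zero] at hloop
    have hlen' : PySem.Str.len s1 = (s1.toList.length : Int) := by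
      simp [PySem.Str.len]
    rw [a1, a2, Bool.and_true, Bool.and_true, hlen', ← hloop]
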